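-- pv_equiv track=rewrite | github.com/rmkraus/ansible-ovirt | patching/library/glfs_health_check.py | _list_strip
-- ===== SOURCE A (Python) =====
-- def _list_strip(arr):
--     '''Remove leading and trailing empty entries from list.'''
--     output = []
--     buffer = []
--     seen_text = False
--     for item in arr:
--         if item.strip():
--             seen_text = True
--             output += buffer
--             buffer = []
--             output.append(item)
--         elif seen_text:
--             buffer.append(item)
--     return output
-- ===== SOURCE B (Python) =====
-- def _list_strip(arr):
--     '''Remove leading and trailing empty entries from list.'''
--     flags = [bool(x.strip()) for x in arr]
--     if True not in flags:
--         return []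
--     first = flags.index(True)
--     last = len(flags) - 1 - flags[::-1].index(True)
--     return arr[first:last + 1]
-- ===== Notes on version B (the rewrite author's own statement) =====
-- stated objective: simpler
-- what changed: Replaces A's buffer/seen_text flush state machine with a boundary-find-then-slice: map each element to a truthiness flag, locate the first and last True, and slice the original list between them.
import Mathlib
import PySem

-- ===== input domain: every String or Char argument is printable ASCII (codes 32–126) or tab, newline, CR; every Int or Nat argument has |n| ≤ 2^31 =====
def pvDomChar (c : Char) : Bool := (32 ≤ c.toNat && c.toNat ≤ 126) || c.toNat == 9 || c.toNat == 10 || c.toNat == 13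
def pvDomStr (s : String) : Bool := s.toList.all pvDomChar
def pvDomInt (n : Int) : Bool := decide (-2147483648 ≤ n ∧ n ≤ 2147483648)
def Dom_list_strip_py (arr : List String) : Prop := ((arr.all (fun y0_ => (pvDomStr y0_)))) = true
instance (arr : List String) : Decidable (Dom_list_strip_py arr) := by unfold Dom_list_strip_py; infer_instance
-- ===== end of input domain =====

-- B replaces A's buffer/flush state machine by a boundary-find-then-slice decomposition (objective: simpler).

-- ===== PORT A =====
-- A's loop state: (output, buffer, seen_text)
def pvStepA (st : List String × List String × Bool) (item : String) : List String × List String × Bool :=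
  if PySem.Str.strip item ≠ "" then (st.1 ++ st.2.1 ++ [item], [], true)
  else if st.2.2 then (st.1, st.2.1 ++ [item], st.2.2)
  else st

def list_strip_py (arr : List String) : List String :=
  (arr.foldl pvStepA ([], [], false)).1

-- ===== PORT B =====
def list_strip_py_alt (arr : List String) : List String :=
  let flags : List Bool := arr.map (fun x => !(PySem.Str.strip x == ""))
  if flags.contains true = false then []
  else
    let first : Nat := (PySem.List.index? flags true).getD 0
    let revIdx : Nat := (PySem.List.index? flags.reverse true).getD 0
    let last : Int := (flags.length : Int) - 1 - (revIdx : Int)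
    PySem.List.slice arr (some (first : Int)) (some (last + 1))

-- ===== PRECONDITION & SPEC =====
def Spec_list_strip_py (arr : List String) (out : List String) : Prop := out = list_strip_py_alt arr
instance (arr : List String) (out : List String) : Decidable (Spec_list_strip_py arr out) := by unfold Spec_list_strip_py; infer_instance

-- ===== CLAIM (what is proved, stated in full; the proofs are below) =====
def Claim_equal_list_strip_py : Prop := ∀ (arr : List String), Dom_list_strip_py arr → Spec_list_strip_py arr (list_strip_py arr)

-- ===== LEMMAS AND PROOFS =====

-- "item is blank", the shared predicate both ports branch on
def pvBlank (s : String) : Bool := PySem.Str.strip s == ""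

-- the common specification: drop leading blanks, then drop trailing blanks
def pvSpecStrip (arr : List String) : List String :=
  List.rdropWhile pvBlank (List.dropWhile pvBlank arr)

theorem pvStepA_nonblank (out buf : List String) (b : Bool) (x : String)
    (hs : PySem.Str.strip x ≠ "") : pvStepA (out, buf, b) x = (out ++ buf ++ [x], [], true) := by
  simp [pvStepA, hs]

theorem pvStepA_blank_seen (out buf : List String) (x : String)
    (hs : ¬ PySem.Str.strip x ≠ "") : pvStepA (out, buf, true) x = (out, buf ++ [x], true) := by
  simp [pvStepA, hs]

theorem pvStepA_blank_unseen (out buf : List String) (x : String)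
    (hs : ¬ PySem.Str.strip x ≠ "") : pvStepA (out, buf, false) x = (out, buf, false) := by
  simp [pvStepA, hs]

theorem pv_rdropWhile_cons_of_any {p : String → Bool} (x : String) {xs : List String}
    (h : ∃ y ∈ xs, p y = false) :
    List.rdropWhile p (x :: xs) = x :: List.rdropWhile p xs := by
  have hne : List.dropWhile p xs.reverse ≠ [] := by
    intro hnil
    obtain ⟨y, hy, hpy⟩ := h
    have := List.dropWhile_eq_nil_iff.mp hnil y (by simpa using hy)
    simp [hpy] at this
  simp only [List.rdropWhile, List.reverse_cons]
  rw [List.dropWhile_append]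
  simp [List.isEmpty_iff, hne]

theorem pv_rdropWhile_cons_of_all {p : String → Bool} (x : String) {xs : List String}
    (hx : p x = false) (h : ∀ y ∈ xs, p y = true) :
    List.rdropWhile p (x :: xs) = [x] := by
  have hnil : List.dropWhile p xs.reverse = [] :=
    List.dropWhile_eq_nil_iff.mpr (fun y hy => h y (by simpa using hy))
  simp only [List.rdropWhile, List.reverse_cons]
  rw [List.dropWhile_append]
  simp [hnil, hx]

-- A's loop once text has been seen: output gets the buffer flushed plus the
-- trailing-blank-stripped rest, iff some further text appears.
theorem pv_foldA_true (xs : List String) (out buf : List String) :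
    (xs.foldl pvStepA (out, buf, true)).1 =
      out ++ (if xs.any (fun x => !pvBlank x) then buf ++ List.rdropWhile pvBlank xs else []) := by
  induction xs generalizing out buf with
  | nil => simp
  | cons x xs ih =>
    by_cases hx : pvBlank x = true
    · have hs : ¬ (PySem.Str.strip x ≠ "") := by simp [pvBlank] at hx; simp [hx]
      rw [List.foldl_cons, pvStepA_blank_seen _ _ _ hs, ih]
      by_cases hany : xs.any (fun x => !pvBlank x) = true
      · obtain ⟨y, hy, hpy⟩ := by simpa using hany
        rw [pv_rdropWhile_cons_of_any x ⟨y, hy, by simpa using hpy⟩]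
        simp [List.any_cons, hany, hx]
      · simp only [List.any_cons, hx, Bool.not_true, Bool.false_or, hany]
        simp
    · have hx' : pvBlank x = false := by simpa using hx
      have hs : PySem.Str.strip x ≠ "" := by simpa [pvBlank] using hx'
      rw [List.foldl_cons, pvStepA_nonblank _ _ _ _ hs, ih]
      by_cases hany : xs.any (fun x => !pvBlank x) = true
      · obtain ⟨y, hy, hpy⟩ := by simpa using hany
        rw [pv_rdropWhile_cons_of_any x ⟨y, hy, by simpa using hpy⟩]
        simp [List.any_cons, hx', hany]
      · have hall : ∀ y ∈ xs, pvBlank y = true := by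
          intro y hy; by_contra hc
          exact hany (by simp only [List.any_eq_true]; exact ⟨y, hy, by simpa using hc⟩)
        rw [pv_rdropWhile_cons_of_all x hx' hall]
        simp [List.any_cons, hx', hany]

-- A's whole loop computes the spec
theorem pv_A_eq_spec (arr : List String) : list_strip_py arr = pvSpecStrip arr := by
  unfold list_strip_py
  induction arr with
  | nil => simp [pvSpecStrip]
  | cons x xs ih =>
    by_cases hx : pvBlank x = true
    · have hs : ¬ (PySem.Str.strip x ≠ "") := by simp [pvBlank] at hx; simp [hx]
      rw [List.foldl_cons, pvStepA_blank_unseen _ _ _ hs]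
      simpa [pvSpecStrip, List.dropWhile_cons, hx] using ih
    · have hx' : pvBlank x = false := by simpa using hx
      have hs : PySem.Str.strip x ≠ "" := by simpa [pvBlank] using hx'
      rw [List.foldl_cons, pvStepA_nonblank _ _ _ _ hs, pv_foldA_true]
      by_cases hany : xs.any (fun x => !pvBlank x) = true
      · obtain ⟨y, hy, hpy⟩ := by simpa using hany
        simp [pvSpecStrip, hx',
          pv_rdropWhile_cons_of_any x ⟨y, hy, by simpa using hpy⟩, hany]
      · have hall : ∀ y ∈ xs, pvBlank y = true := by
          intro y hy; by_contra hc
          exact hany (by simp only [List.any_eq_true]; exact ⟨y, hy, by simpa using hc⟩)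
        simp [pvSpecStrip, hx',
          pv_rdropWhile_cons_of_all x hx' hall, hany]

-- first True in the mapped flags = length of the leading blank run
theorem pv_index_map (l : List String) (h : ∃ x ∈ l, pvBlank x = false) :
    PySem.List.index? (l.map (fun x => !(PySem.Str.strip x == ""))) true =
      some ((l.takeWhile pvBlank).length) := by
  induction l with
  | nil => simp at h
  | cons x xs ih =>
    by_cases hx : pvBlank x = true
    · have hx' : (!(PySem.Str.strip x == "")) = false := by simpa [pvBlank] using hx
      obtain ⟨y, hy, hpy⟩ := h
      have hyxs : y ∈ xs := by
        rcases List.mem_cons.mp hy with rfl | h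
        · rw [hpy] at hx; cases hx
        · exact h
      rw [List.map_cons, hx', PySem.List.index?_cons_of_ne _ (by simp),
        ih ⟨y, hyxs, hpy⟩]
      simp [hx]
    · have hx' : (!(PySem.Str.strip x == "")) = true := by simpa [pvBlank] using hx
      rw [List.map_cons, hx']
      rw [PySem.List.index?_cons_self]
      simp [(by simpa using hx : pvBlank x = false)]

-- drop (length of takeWhile) = dropWhile
theorem pv_drop_takeWhile (p : String → Bool) (l : List String) :
    l.drop ((l.takeWhile p).length) = l.dropWhile p := by
  induction l with
  | nil => simp
  | cons x xs ih =>
    by_cases hx : p x = true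
    · simp [hx, ih]
    · simp [hx]

-- rdropWhile as a take
theorem pv_rdropWhile_eq_take (p : String → Bool) (l : List String) :
    List.rdropWhile p l = l.take (l.length - (l.reverse.takeWhile p).length) := by
  rw [List.rdropWhile, ← pv_drop_takeWhile p l.reverse]
  rw [List.reverse_drop]
  simp

theorem pv_takeWhile_append_left (p : String → Bool) (l₁ l₂ : List String)
    (h : ∃ x ∈ l₁, p x = false) :
    (l₁ ++ l₂).takeWhile p = l₁.takeWhile p := by
  induction l₁ with
  | nil => simp at h
  | cons x xs ih =>
    by_cases hx : p x = true
    · obtain ⟨y, hy, hpy⟩ := h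
      have hyxs : y ∈ xs := by
        rcases List.mem_cons.mp hy with rfl | h
        · rw [hpy] at hx; cases hx
        · exact h
      simp [hx, ih ⟨y, hyxs, hpy⟩]
    · simp [hx]

-- B computes the spec
theorem pv_B_eq_spec (arr : List String) : list_strip_py_alt arr = pvSpecStrip arr := by
  unfold list_strip_py_alt
  by_cases hc : (arr.map (fun x => !(PySem.Str.strip x == ""))).contains true = true
  · -- some element is non-blank
    have hmem : ∃ x ∈ arr, pvBlank x = false := by
      have := List.contains_iff_exists_mem_beq .. |>.mp hc
      obtain ⟨b, hb, hbeq⟩ := this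
      obtain ⟨x, hx, rfl⟩ := List.mem_map.mp hb
      exact ⟨x, hx, by simpa [pvBlank] using hbeq⟩
    have hmemr : ∃ x ∈ arr.reverse, pvBlank x = false := by
      obtain ⟨x, hx, hpx⟩ := hmem; exact ⟨x, by simpa using hx, hpx⟩
    have hcf : ¬ ((arr.map (fun x => !(PySem.Str.strip x == ""))).contains true = false) := by
      rw [hc]; simp
    rw [if_neg hcf, ← List.map_reverse, pv_index_map arr hmem, pv_index_map arr.reverse hmemr]
    set k := (arr.takeWhile pvBlank).length with hk
    set m := (arr.reverse.takeWhile pvBlank).length with hm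
    have hmle : m ≤ arr.length := by
      have := (List.takeWhile_sublist (l := arr.reverse) (p := pvBlank)).length_le
      simpa using this
    simp only [Option.getD_some, List.length_map]
    have hcast : ((arr.length : Int) - 1 - (m : Int) + 1) = ((arr.length - m : Nat) : Int) := by
      push_cast [Int.ofNat_sub hmle]; ring
    rw [hcast, PySem.List.slice_natCast]
    -- now: (arr.drop k).take ((arr.length - m) - k) = pvSpecStrip arr
    rw [pv_drop_takeWhile pvBlank arr]
    set d := arr.dropWhile pvBlank with hd
    have harr : arr.takeWhile pvBlank ++ d = arr := List.takeWhile_append_dropWhile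
    have hdlen : k + d.length = arr.length := by
      have h2 := congrArg List.length harr
      rw [List.length_append] at h2
      omega
    have hdmem : ∃ x ∈ d, pvBlank x = false := by
      obtain ⟨x, hx, hpx⟩ := hmem
      rcases (by rw [← harr] at hx; simpa using hx : x ∈ arr.takeWhile pvBlank ∨ x ∈ d) with h1 | h1
      · exact absurd (List.mem_takeWhile_imp h1) (by simp [hpx])
      · exact ⟨x, h1, hpx⟩
    have hrev : arr.reverse = d.reverse ++ (arr.takeWhile pvBlank).reverse := by
      conv_lhs => rw [← harr]
      simp
    have hdm : (d.reverse.takeWhile pvBlank).length = m := by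
      rw [hm, hrev, pv_takeWhile_append_left pvBlank _ _
        (by obtain ⟨x, hx, hpx⟩ := hdmem; exact ⟨x, by simpa using hx, hpx⟩)]
    have htake : arr.length - m - k = d.length - m := by omega
    rw [pvSpecStrip, ← hd, pv_rdropWhile_eq_take, hdm, htake]
  · -- all blank: both sides empty
    have hall : ∀ x ∈ arr, pvBlank x = true := by
      intro x hx
      by_contra hcon
      exact hc (List.contains_iff_exists_mem_beq .. |>.mpr
        ⟨true, List.mem_map.mpr ⟨x, hx, by simpa [pvBlank] using hcon⟩, rfl⟩)
    have hdrop : arr.dropWhile pvBlank = [] := List.dropWhile_eq_nil_iff.mpr hall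
    have hcf : (arr.map (fun x => !(PySem.Str.strip x == ""))).contains true = false := by
      simpa using hc
    rw [if_pos hcf, pvSpecStrip, hdrop]
    simp [List.rdropWhile]

-- ===== VERDICT (by name: the statement is the Claim_ definition above) =====
theorem list_strip_py_spec : Claim_equal_list_strip_py := by
  intro arr _
  unfold Spec_list_strip_py
  rw [pv_A_eq_spec, pv_B_eq_spec]
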